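-- pv_equiv track=rewrite | github.com/mihaicaragheorghe/adventofcode2025 | day06/b.py | solve
-- ===== SOURCE A (Python) =====
-- def solve(problems: list[str]) -> int:
--     total = 0
--     curr_sign = get_sign(problems, len(problems[0]) - 1)
--     curr_res = 1 if curr_sign == "*" else 0
--
--     for x in reversed(range(0, len(problems[0]))):
--         curr_num = ""
--         for y in range(0, len(problems) - 1):
--             if problems[y][x].isdigit():
--                 curr_num += problems[y][x]
--
--         if not curr_num:
--             total += curr_res
--             curr_sign = get_sign(problems, x)
--             curr_res = 1 if curr_sign == "*" else 0
--             continue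
--
--         if curr_sign == "+":
--             curr_res += int(curr_num)
--         elif curr_sign == "*":
--             curr_res *= int(curr_num)
--
--         if x == 0:
--             total += curr_res
--
--     return total
--
-- def get_sign(problems: list[str], x: int):
--     while x > 0 and x < len(problems[0]) and problems[-1][x] == " ":
--         x -= 1
--     return problems[-1][x]
-- ===== SOURCE B (Python) =====
-- def solve(problems: list[str]) -> int:
--     last = problems[-1]
--     W = len(problems[0])
--
--     def sign_at(x: int) -> str:
--         while x > 0 and last[x] == " ":
--             x -= 1
--         return last[x]
--
--     def flush(nums: list[int], sign: str, first: bool) -> int: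
--         # value of a finished group; an empty leading group contributes nothing
--         if first and not nums:
--             return 0
--         if sign == "+":
--             return sum(nums)
--         if sign == "*":
--             r = 1
--             for n in nums:
--                 r *= n
--             return r
--         return 0
--
--     # one left-to-right sweep: collect each group's numbers, flush at blank columns
--     total = 0
--     nums: list[int] = []
--     first = True
--     for x in range(W):
--         col = "".join(row[x] for row in problems[:-1] if row[x].isdigit())
--         if col:
--             nums.append(int(col))
--         else:
--             total += flush(nums, sign_at(x), first)
--             nums = []
--             first = False
--     total += flush(nums, sign_at(W - 1), first)
--     return total
-- ===== Notes on version B (the rewrite author's own statement) =====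
-- stated objective: alternative
-- what changed: B replaces A's right-to-left state machine (carried sign, running accumulator reset at blanks, special x==0 add) by a single left-to-right group-splitting sweep: it collects each blank-separated group's column numbers into a list and flushes the whole group at its terminating blank (or at the end) as a closed-form sum/product, so no sign/accumulator state is threaded through the scan.
import Mathlib
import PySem

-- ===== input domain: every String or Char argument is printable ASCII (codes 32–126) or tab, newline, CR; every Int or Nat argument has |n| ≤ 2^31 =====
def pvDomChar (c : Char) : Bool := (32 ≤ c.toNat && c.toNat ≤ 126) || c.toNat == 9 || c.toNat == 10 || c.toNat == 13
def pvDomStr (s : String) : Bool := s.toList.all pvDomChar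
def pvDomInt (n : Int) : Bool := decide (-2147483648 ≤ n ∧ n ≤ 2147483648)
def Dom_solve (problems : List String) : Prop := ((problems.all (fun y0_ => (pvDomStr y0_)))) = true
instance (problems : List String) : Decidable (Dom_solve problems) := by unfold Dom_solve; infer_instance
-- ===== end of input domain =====

-- B replaces A's right-to-left sign/accumulator state machine by a left-to-right group-splitting
-- sweep that flushes each blank-separated group as a closed-form sum/product; objective: alternative.

-- ===== PORT A =====
-- get_sign's while loop: scan left while the last row holds a space (x == 0 stops the scan).
def getSignAux (lastRow : List Char) (W : Int) (x : Int) : Char :=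
  if h : 0 < x ∧ x < W ∧ PySem.List.pyGet? lastRow x = some ' ' then
    getSignAux lastRow W (x - 1)
  else
    PySem.List.pyGetD lastRow x ' '
termination_by x.toNat
decreasing_by omega

def solve (problems : List String) : Int :=
  let lastRow := (PySem.List.pyGetD problems (-1) "").toList
  let W : Int := ((PySem.List.pyGetD problems 0 "").toList.length : Int)
  let H : Int := (problems.length : Int)
  let s0 := getSignAux lastRow W (W - 1)
  (((PySem.List.pyRange 0 W 1).reverse).foldl
    (fun (st : Int × Char × Int) x =>
      let num := (PySem.List.pyRange 0 (H - 1) 1).foldl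
        (fun acc y =>
          let c := PySem.List.pyGetD ((PySem.List.pyGetD problems y "").toList) x ' '
          if PySem.Chars.isdigit c then acc ++ [c] else acc) ([] : List Char)
      if num = [] then
        let s := getSignAux lastRow W x
        (st.1 + st.2.2, s, if s = '*' then (1 : Int) else 0)
      else
        let res := if st.2.1 = '+' then st.2.2 + (PySem.Int.ofChars? num).getD 0
          else if st.2.1 = '*' then st.2.2 * (PySem.Int.ofChars? num).getD 0
          else st.2.2
        (if x = 0 then st.1 + res else st.1, st.2.1, res))
    (0, s0, if s0 = '*' then (1 : Int) else 0)).1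

-- ===== PORT B =====
-- Source B's sign_at: while x > 0 and last[x] == " ": x -= 1; return last[x].
def signAtB (lastRow : List Char) (x : Int) : Char :=
  if h : 0 < x ∧ PySem.List.pyGet? lastRow x = some ' ' then
    signAtB lastRow (x - 1)
  else
    PySem.List.pyGetD lastRow x ' '
termination_by x.toNat
decreasing_by omega

-- Source B's flush: an empty leading group contributes nothing; '+' is sum(nums), '*' a product loop.
def flushB (nums : List Int) (sign : Char) (first : Bool) : Int :=
  if first = true ∧ nums = [] then 0
  else if sign = '+' then nums.foldl (· + ·) 0
  else if sign = '*' then nums.foldl (· * ·) 1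
  else 0

def solve_alt (problems : List String) : Int :=
  let lastRow := (PySem.List.pyGetD problems (-1) "").toList
  let W : Int := ((PySem.List.pyGetD problems 0 "").toList.length : Int)
  let st := (PySem.List.pyRange 0 W 1).foldl
    (fun (st : Int × List Int × Bool) x =>
      let col := (PySem.List.slice problems none (some (-1))).foldl
        (fun acc row =>
          let c := PySem.List.pyGetD row.toList x ' '
          if PySem.Chars.isdigit c then acc ++ [c] else acc) ([] : List Char)
      if col = [] then
        (st.1 + flushB st.2.1 (signAtB lastRow x) st.2.2, ([] : List Int), false)
      else
        (st.1, st.2.1 ++ [(PySem.Int.ofChars? col).getD 0], st.2.2))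
    (0, [], true)
  st.1 + flushB st.2.1 (signAtB lastRow (W - 1)) st.2.2

-- ===== PRECONDITION & SPEC =====
-- Pre_ is exactly where the Python A returns: a nonempty grid, every row at least as long as
-- row 0 (A indexes every row at every column < len(problems[0])), and a nonempty last row
-- (get_sign indexes problems[-1] even when row 0 is empty).
def Pre_solve (problems : List String) : Prop :=
  problems ≠ [] ∧
  (∀ r ∈ problems, (problems.headD "").toList.length ≤ r.toList.length) ∧
  ((problems.getLast?.getD "").toList ≠ [])
instance (problems : List String) : Decidable (Pre_solve problems) := by
  unfold Pre_solve; infer_instance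

def pvWitness_solve : List String := ["1 23", "4  5", "+  *"]

def Spec_solve (problems : List String) (out : Int) : Prop := out = solve_alt problems
instance (problems : List String) (out : Int) : Decidable (Spec_solve problems out) := by
  unfold Spec_solve; infer_instance

-- ===== CLAIM (what is proved, stated in full; the proofs are below) =====
def Claim_equal_solve : Prop := ∀ (problems : List String), Dom_solve problems → Pre_solve problems → Spec_solve problems (solve problems)

-- ===== LEMMAS AND PROOFS =====

-- abstract machinery: both ports are folds over the per-column records (digit string, sign)
def numC (c : List Char) : Int := (PySem.Int.ofChars? c).getD 0
def applyS (s : Char) (r n : Int) : Int :=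
  if s = '+' then r + n else if s = '*' then r * n else r
def initS (s : Char) : Int := if s = '*' then (1 : Int) else 0

def stepA (st : Int × Char × Int) (rc : List Char × Char) : Int × Char × Int :=
  if rc.1 = [] then (st.1 + st.2.2, rc.2, initS rc.2)
  else (st.1, st.2.1, applyS st.2.1 st.2.2 (numC rc.1))

def stepB (st : Int × List Int × Bool) (rc : List Char × Char) : Int × List Int × Bool :=
  if rc.1 = [] then (st.1 + flushB st.2.1 rc.2 st.2.2, ([] : List Int), false)
  else (st.1, st.2.1 ++ [numC rc.1], st.2.2)

def auxA (s0 : Char) (rs : List (List Char × Char)) : Int × Char × Int :=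
  rs.foldr (fun rc st => stepA st rc) (0, s0, initS s0)

def leadNums : List (List Char × Char) → List Int
  | [] => []
  | (c, _) :: rs => if c = [] then [] else numC c :: leadNums rs

-- proof-side abbreviations for the grid's derived data
def lastC (problems : List String) : List Char := (PySem.List.pyGetD problems (-1) "").toList
def wOf (problems : List String) : Int := ((PySem.List.pyGetD problems 0 "").toList.length : Int)
def colA (problems : List String) (x : Int) : List Char :=
  (PySem.List.pyRange 0 ((problems.length : Int) - 1) 1).foldl
    (fun acc y =>
      let c := PySem.List.pyGetD ((PySem.List.pyGetD problems y "").toList) x ' '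
      if PySem.Chars.isdigit c then acc ++ [c] else acc) ([] : List Char)
def recOf (problems : List String) (x : Int) : List Char × Char :=
  (colA problems x, getSignAux (lastC problems) (wOf problems) x)
def s0Of (problems : List String) : Char :=
  getSignAux (lastC problems) (wOf problems) (wOf problems - 1)
def recsOf (problems : List String) : List (List Char × Char) :=
  (PySem.List.pyRange 0 (wOf problems) 1).map (recOf problems)

-- A's positional loop body, parametric in the record function
def posA (r : Int → List Char × Char) (st : Int × Char × Int) (x : Int) : Int × Char × Int :=
  if (r x).1 = [] then (st.1 + st.2.2, (r x).2, initS (r x).2)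
  else (if x = 0 then st.1 + applyS st.2.1 st.2.2 (numC (r x).1) else st.1,
        st.2.1, applyS st.2.1 st.2.2 (numC (r x).1))

-- small rewrite equations
lemma auxA_cons (s0 : Char) (c : List Char) (sc : Char) (rs : List (List Char × Char)) :
    auxA s0 ((c, sc) :: rs) = stepA (auxA s0 rs) (c, sc) := rfl
lemma stepA_blank (st : Int × Char × Int) (sc : Char) :
    stepA st ([], sc) = (st.1 + st.2.2, sc, initS sc) := by simp [stepA]
lemma stepA_num (st : Int × Char × Int) (c : List Char) (sc : Char) (hc : c ≠ []) :
    stepA st (c, sc) = (st.1, st.2.1, applyS st.2.1 st.2.2 (numC c)) := by simp [stepA, hc]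
lemma stepB_blank (st : Int × List Int × Bool) (sc : Char) :
    stepB st ([], sc) = (st.1 + flushB st.2.1 sc st.2.2, [], false) := by simp [stepB]
lemma stepB_num (st : Int × List Int × Bool) (c : List Char) (sc : Char) (hc : c ≠ []) :
    stepB st (c, sc) = (st.1, st.2.1 ++ [numC c], st.2.2) := by simp [stepB, hc]
lemma leadNums_blank (sc : Char) (rs : List (List Char × Char)) :
    leadNums (([], sc) :: rs) = [] := by simp [leadNums]
lemma leadNums_num (c : List Char) (sc : Char) (rs : List (List Char × Char)) (hc : c ≠ []) :
    leadNums ((c, sc) :: rs) = numC c :: leadNums rs := by simp [leadNums, hc]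

lemma applyS_swap (s : Char) (i m n : Int) :
    applyS s (applyS s i m) n = applyS s (applyS s i n) m := by
  unfold applyS; split_ifs <;> ring

lemma foldl_applyS_out (s : Char) :
    ∀ (xs : List Int) (i n : Int),
      applyS s (xs.foldl (applyS s) i) n = xs.foldl (applyS s) (applyS s i n) := by
  intro xs
  induction xs with
  | nil => intro i n; rfl
  | cons a l ih =>
    intro i n
    simp only [List.foldl_cons]
    rw [ih, applyS_swap]

lemma foldl_applyS_other (s : Char) (hp : s ≠ '+') (hm : s ≠ '*') :
    ∀ (xs : List Int) (i : Int), xs.foldl (applyS s) i = i := by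
  intro xs
  induction xs with
  | nil => intro i; rfl
  | cons a l ih => intro i; simp only [List.foldl_cons, applyS, hp, hm, if_false]; exact ih _

lemma applyS_plus : applyS '+' = fun r n => r + n := by
  funext r n; simp [applyS]
lemma applyS_mul : applyS '*' = fun r n => r * n := by
  funext r n; simp [applyS]

lemma flushB_false (xs : List Int) (s : Char) :
    flushB xs s false = xs.foldl (applyS s) (initS s) := by
  unfold flushB
  by_cases hp : s = '+'
  · subst hp; rw [applyS_plus]; simp [initS]
  · by_cases hm : s = '*'
    · subst hm; rw [applyS_mul]; simp [initS]
    · simp only [hp, hm, if_false, Bool.false_eq_true, false_and]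
      rw [foldl_applyS_other s hp hm]
      simp [initS, hm]

lemma flushB_ne (xs : List Int) (s : Char) (f : Bool) (hxs : xs ≠ []) :
    flushB xs s f = xs.foldl (applyS s) (initS s) := by
  rw [← flushB_false]
  unfold flushB
  simp [hxs]

lemma auxA_ra (s0 : Char) :
    ∀ rs, (auxA s0 rs).2.2
      = (leadNums rs).foldl (applyS (auxA s0 rs).2.1) (initS (auxA s0 rs).2.1) := by
  intro rs
  induction rs with
  | nil => rfl
  | cons rc rs ih =>
    obtain ⟨c, sc⟩ := rc
    by_cases hc : c = []
    · subst hc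
      rw [auxA_cons, stepA_blank, leadNums_blank]
      rfl
    · rw [auxA_cons, stepA_num _ _ _ hc, leadNums_num _ _ _ hc]
      simp only [List.foldl_cons]
      rw [ih, foldl_applyS_out]

lemma mainG (s0 : Char) :
    ∀ (rs : List (List Char × Char)) (t : Int) (nums : List Int) (f : Bool),
      (rs.foldl stepB (t, nums, f)).1
        + flushB (rs.foldl stepB (t, nums, f)).2.1 s0 (rs.foldl stepB (t, nums, f)).2.2
      = t + (auxA s0 rs).1 + flushB (nums ++ leadNums rs) (auxA s0 rs).2.1 f := by
  intro rs
  induction rs with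
  | nil => intro t nums f; simp [auxA, leadNums]
  | cons rc rs ih =>
    obtain ⟨c, sc⟩ := rc
    intro t nums f
    by_cases hc : c = []
    · subst hc
      simp only [List.foldl_cons, stepB_blank]
      rw [ih]
      rw [auxA_cons, stepA_blank, leadNums_blank]
      simp only [List.nil_append, List.append_nil]
      rw [flushB_false, ← auxA_ra s0 rs]
      ring
    · simp only [List.foldl_cons, stepB_num _ _ _ hc]
      rw [ih]
      rw [auxA_cons, stepA_num _ _ _ hc, leadNums_num _ _ _ hc]
      simp only [List.append_assoc, List.singleton_append]

lemma abstract_eq (s0 : Char) (rs : List (List Char × Char)) :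
    ((rs.reverse.foldl stepA (0, s0, initS s0)).1
      + (if (rs.headD ([], ' ')).1 ≠ [] then (rs.reverse.foldl stepA (0, s0, initS s0)).2.2 else 0))
    = ((rs.foldl stepB (0, [], true)).1
        + flushB (rs.foldl stepB (0, [], true)).2.1 s0 (rs.foldl stepB (0, [], true)).2.2) := by
  have hrev : rs.reverse.foldl stepA (0, s0, initS s0) = auxA s0 rs := by
    rw [List.foldl_reverse]; rfl
  rw [hrev, mainG s0 rs 0 [] true, List.nil_append, zero_add]
  congr 1
  cases rs with
  | nil => simp [leadNums, flushB]
  | cons rc rs' =>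
    obtain ⟨c, sc⟩ := rc
    by_cases hc : c = []
    · subst hc
      rw [leadNums_blank]
      simp [flushB]
    · rw [flushB_ne (leadNums ((c, sc) :: rs')) _ _
        (by rw [leadNums_num _ _ _ hc]; exact List.cons_ne_nil _ _),
        ← auxA_ra s0 ((c, sc) :: rs')]
      simp [hc]

-- positional sign functions agree on the scanned range
lemma sign_eq_base (L : List Char) (W x : Int) (hx : ¬ 0 < x) :
    getSignAux L W x = signAtB L x := by
  rw [getSignAux, signAtB]
  simp only [hx, false_and, dif_neg, not_false_eq_true]

lemma sign_eq (L : List Char) (W : Int) (hlen : W ≤ (L.length : Int)) :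
    ∀ (n : Nat) (x : Int), x.toNat ≤ n → x < W → getSignAux L W x = signAtB L x := by
  intro n
  induction n with
  | zero =>
    intro x hx hxW
    exact sign_eq_base L W x (by omega)
  | succ m ih =>
    intro x hx hxW
    by_cases hpos : 0 < x
    · have hlt : x < (L.length : Int) := lt_of_lt_of_le hxW hlen
      have hget : PySem.List.pyGet? L x = some (L[x.toNat]'(by omega)) :=
        PySem.List.pyGet?_eq_some_getElem L (le_of_lt hpos) hlt
      by_cases hsp : L[x.toNat]'(by omega) = ' '
      · rw [getSignAux, signAtB]
        have c1 : 0 < x ∧ x < W ∧ PySem.List.pyGet? L x = some ' ' := by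
          refine ⟨hpos, hxW, ?_⟩; rw [hget, hsp]
        have c2 : 0 < x ∧ PySem.List.pyGet? L x = some ' ' := ⟨hpos, c1.2.2⟩
        rw [dif_pos c1, dif_pos c2]
        exact ih (x - 1) (by omega) (by omega)
      · rw [getSignAux, signAtB]
        have c1 : ¬ (0 < x ∧ x < W ∧ PySem.List.pyGet? L x = some ' ') := by
          rintro ⟨-, -, h⟩; rw [hget] at h; exact hsp (by injection h)
        have c2 : ¬ (0 < x ∧ PySem.List.pyGet? L x = some ' ') := by
          rintro ⟨-, h⟩; rw [hget] at h; exact hsp (by injection h)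
        rw [dif_neg c1, dif_neg c2]
    · exact sign_eq_base L W x hpos

-- A's range-based column fold equals B's slice-based one (as in the ports)
lemma col_eq (problems : List String) (hne : problems ≠ []) (x : Int) :
    colA problems x
    = (PySem.List.slice problems none (some (-1))).foldl
        (fun acc row =>
          let c := PySem.List.pyGetD row.toList x ' '
          if PySem.Chars.isdigit c then acc ++ [c] else acc) ([] : List Char) := by
  unfold colA
  rw [PySem.List.slice_to_neg_one]
  have hlen : ((problems.length : Int) - 1) = (problems.dropLast.length : Int) := by
    have h1 : 1 ≤ problems.length := List.length_pos_iff.mpr hne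
    simp [List.length_dropLast]
    omega
  rw [hlen]
  rw [PySem.List.foldl_congr_mem _ _
    (fun acc y =>
      let c := PySem.List.pyGetD ((PySem.List.pyGetD problems.dropLast y "").toList) x ' '
      if PySem.Chars.isdigit c then acc ++ [c] else acc) _
    (by
      intro acc y hy
      rw [PySem.List.mem_pyRange_one] at hy
      have h0 : 0 ≤ y := hy.1
      have h1 : y < (problems.dropLast.length : Int) := hy.2
      have h2 : y < (problems.length : Int) := by
        simp [List.length_dropLast] at h1 ⊢; omega
      simp only []
      rw [PySem.List.pyGetD_eq_getElem problems "" h0 h2,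
          PySem.List.pyGetD_eq_getElem problems.dropLast "" h0 h1,
          List.getElem_dropLast])]
  exact PySem.List.foldl_pyRange_zero_pyGetD' problems.dropLast ""
    (fun acc row =>
      let c := PySem.List.pyGetD row.toList x ' '
      if PySem.Chars.isdigit c then acc ++ [c] else acc) []

-- port A is the positional machine over its own record function
lemma solveA_pos (problems : List String) :
    solve problems
    = ((PySem.List.pyRange 0 (wOf problems) 1).reverse.foldl (posA (recOf problems))
        (0, s0Of problems, initS (s0Of problems))).1 := by
  unfold solve posA recOf colA lastC wOf s0Of initS applyS numC
  rfl

-- the positional machine, re-expressed over the record list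
lemma posA_abstract (r : Int → List Char × Char) (W : Int) (s0 : Char) :
    ((PySem.List.pyRange 0 W 1).reverse.foldl (posA r) (0, s0, initS s0)).1
    = (((PySem.List.pyRange 0 W 1).map r).reverse.foldl stepA (0, s0, initS s0)).1
      + (if (((PySem.List.pyRange 0 W 1).map r).headD ([], ' ')).1 ≠ []
          then (((PySem.List.pyRange 0 W 1).map r).reverse.foldl stepA (0, s0, initS s0)).2.2
          else 0) := by
  by_cases hW : W ≤ 0
  · rw [PySem.List.pyRange_one_eq_nil hW]
    simp
  · have hpos : (0 : Int) < W := by omega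
    rw [PySem.List.pyRange_one_cons hpos]
    have h01 : (0 : Int) + 1 = 1 := by norm_num
    rw [h01, List.reverse_cons, List.map_cons, List.reverse_cons,
        List.foldl_append, List.foldl_append]
    have hpre : (PySem.List.pyRange 1 W 1).reverse.foldl (posA r) (0, s0, initS s0)
        = ((PySem.List.pyRange 1 W 1).map r).reverse.foldl stepA (0, s0, initS s0) := by
      rw [← List.map_reverse, List.foldl_map]
      apply PySem.List.foldl_congr_mem
      intro acc x hx
      rw [List.mem_reverse, PySem.List.mem_pyRange_one] at hx
      have hx0 : x ≠ 0 := by omega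
      unfold posA stepA
      by_cases hcol : (r x).1 = []
      · simp [hcol]
      · simp [hcol, hx0]
    rw [hpre]
    set st := ((PySem.List.pyRange 1 W 1).map r).reverse.foldl stepA (0, s0, initS s0) with hst
    simp only [List.foldl_cons, List.foldl_nil]
    unfold posA stepA
    by_cases hcol : (r 0).1 = []
    · simp [hcol]
    · simp [hcol]

-- bridge: port A equals the abstract right-to-left machine over the records
lemma bridgeA (problems : List String) :
    solve problems
    = ((recsOf problems).reverse.foldl stepA (0, s0Of problems, initS (s0Of problems))).1
      + (if ((recsOf problems).headD ([], ' ')).1 ≠ []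
          then ((recsOf problems).reverse.foldl stepA
                  (0, s0Of problems, initS (s0Of problems))).2.2 else 0) := by
  rw [solveA_pos, posA_abstract]
  rfl

-- B's positional loop body (as in the port)
def posB (problems : List String) (st : Int × List Int × Bool) (x : Int) :
    Int × List Int × Bool :=
  let col := (PySem.List.slice problems none (some (-1))).foldl
    (fun acc row =>
      let c := PySem.List.pyGetD row.toList x ' '
      if PySem.Chars.isdigit c then acc ++ [c] else acc) ([] : List Char)
  if col = [] then
    (st.1 + flushB st.2.1 (signAtB (lastC problems) x) st.2.2, ([] : List Int), false)
  else
    (st.1, st.2.1 ++ [(PySem.Int.ofChars? col).getD 0], st.2.2)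

-- port B is the positional machine
lemma solveB_pos (problems : List String) :
    solve_alt problems
    = ((PySem.List.pyRange 0 (wOf problems) 1).foldl (posB problems) (0, [], true)).1
      + flushB ((PySem.List.pyRange 0 (wOf problems) 1).foldl (posB problems) (0, [], true)).2.1
          (signAtB (lastC problems) (wOf problems - 1))
          ((PySem.List.pyRange 0 (wOf problems) 1).foldl (posB problems) (0, [], true)).2.2 := by
  unfold solve_alt posB lastC wOf
  rfl

-- bridge: port B equals the abstract left-to-right machine over the records
lemma bridgeB (problems : List String) (hne : problems ≠ [])
    (hlenL : wOf problems ≤ ((lastC problems).length : Int)) :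
    solve_alt problems
    = ((recsOf problems).foldl stepB (0, [], true)).1
      + flushB ((recsOf problems).foldl stepB (0, [], true)).2.1 (s0Of problems)
          ((recsOf problems).foldl stepB (0, [], true)).2.2 := by
  have hW0 : (0 : Int) ≤ wOf problems := by unfold wOf; exact Int.natCast_nonneg _
  have hs0 : signAtB (lastC problems) (wOf problems - 1) = s0Of problems := by
    unfold s0Of
    rcases eq_or_lt_of_le hW0 with h | h
    · exact (sign_eq_base (lastC problems) (wOf problems) (wOf problems - 1) (by omega)).symm
    · exact (sign_eq (lastC problems) (wOf problems) hlenL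
        ((wOf problems - 1).toNat) (wOf problems - 1) le_rfl (by omega)).symm
  have hfold : (PySem.List.pyRange 0 (wOf problems) 1).foldl (posB problems) (0, [], true)
      = (recsOf problems).foldl stepB (0, [], true) := by
    unfold recsOf
    rw [List.foldl_map]
    apply PySem.List.foldl_congr_mem
    intro acc x hx
    rw [PySem.List.mem_pyRange_one] at hx
    have hsx : signAtB (lastC problems) x = getSignAux (lastC problems) (wOf problems) x :=
      (sign_eq (lastC problems) (wOf problems) hlenL x.toNat x le_rfl hx.2).symm
    unfold posB
    simp only [← col_eq problems hne x, hsx]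
    unfold stepB recOf numC
    by_cases hcol : colA problems x = []
    · simp [hcol]
    · simp [hcol]
  rw [solveB_pos, hfold, hs0]

-- ===== VERDICT (by name: the statement is the Claim_ definition above) =====
theorem solve_spec : Claim_equal_solve := by
  intro problems hdom hpre
  obtain ⟨hne, hrows, hlast⟩ := hpre
  have hget0 : PySem.List.pyGetD problems 0 "" = problems.headD "" := by
    rw [PySem.List.pyGetD_zero]; cases problems with
    | nil => rfl
    | cons a l => rfl
  have hgetlast : PySem.List.pyGetD problems (-1) "" = problems.getLast hne :=
    PySem.List.pyGetD_neg_one problems "" hne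
  have hlenL : wOf problems ≤ ((lastC problems).length : Int) := by
    have hmem : problems.getLast hne ∈ problems := List.getLast_mem hne
    have h := hrows _ hmem
    have h' : (problems.headD "").toList.length ≤ (problems.getLast hne).toList.length := h
    unfold wOf lastC
    rw [hget0, hgetlast]
    exact_mod_cast h'
  show solve problems = solve_alt problems
  rw [bridgeA problems, bridgeB problems hne hlenL]
  exact abstract_eq (s0Of problems) (recsOf problems)
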